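-- pv_equiv track=rewrite | github.com/Shubham37204/DSA | PATTERNS/PyramidTriangle.py | pyramidTriangle
-- ===== SOURCE A (Python) =====
-- from typing import List
--
-- def pyramidTriangle(n: int) -> List[str]:
--     """
--     Generate pyramid triangle pattern with ascending and descending numbers.
--
--     Args:
--         n: Number of rows
--
--     Returns:
--         List of strings representing each row
--
--     Time Complexity: O(n^2)
--     Space Complexity: O(n^2)
--     """
--     result = []
--
--     for i in range(n):
--         row = ""
--         # Ascending part
--         for j in range(1, i + 2):
--             row += str(j)
--         # Descending part
--         for j in range(i, 0, -1):
--             row += str(j)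
--         result.append(row)
--
--     return result
-- ===== SOURCE B (Python) =====
-- def pyramidTriangle(n):
--     result = []
--     asc = ""
--     desc = ""
--     for i in range(n):
--         asc += str(i + 1)
--         if i >= 1:
--             desc = str(i) + desc
--         result.append(asc + desc)
--     return result
-- ===== Notes on version B (the rewrite author's own statement) =====
-- stated objective: faster
-- what changed: Replaces the two inner per-row rebuilding loops with two accumulators (ascending prefix and descending suffix) threaded across the single outer loop, so each row reuses the previous row's halves.
import Mathlib
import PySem

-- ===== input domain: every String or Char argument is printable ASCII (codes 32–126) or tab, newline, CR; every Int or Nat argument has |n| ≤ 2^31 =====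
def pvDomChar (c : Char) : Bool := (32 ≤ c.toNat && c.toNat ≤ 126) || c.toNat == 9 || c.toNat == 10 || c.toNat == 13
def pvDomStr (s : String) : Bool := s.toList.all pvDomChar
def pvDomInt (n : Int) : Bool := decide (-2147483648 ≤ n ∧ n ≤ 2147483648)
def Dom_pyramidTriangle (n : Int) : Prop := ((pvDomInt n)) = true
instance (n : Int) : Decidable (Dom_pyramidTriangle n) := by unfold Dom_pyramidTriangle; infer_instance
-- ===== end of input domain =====

-- B keeps the ascending prefix and descending suffix as accumulators across the outer loop
-- instead of rebuilding each half with inner loops; objective: faster (constant factor).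

-- ===== PORT A =====
def pyramidTriangle (n : Int) : List String :=
  (PySem.List.pyRange 0 n 1).foldl (fun result i =>
    let row := ""
    let row := (PySem.List.pyRange 1 (i + 2) 1).foldl (fun row j => row ++ PySem.Int.toStr j) row
    let row := (PySem.List.pyRange i 0 (-1)).foldl (fun row j => row ++ PySem.Int.toStr j) row
    result ++ [row]) []

-- ===== PORT B =====
def pyramidTriangle_alt (n : Int) : List String :=
  let st := (PySem.List.pyRange 0 n 1).foldl (fun (st : String × String × List String) i =>
    let asc := st.1 ++ PySem.Int.toStr (i + 1)
    let desc := if 1 ≤ i then PySem.Int.toStr i ++ st.2.1 else st.2.1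
    (asc, desc, st.2.2 ++ [asc ++ desc])) ("", "", [])
  st.2.2

-- ===== PRECONDITION & SPEC =====
def Spec_pyramidTriangle (n : Int) (out : List String) : Prop := out = pyramidTriangle_alt n
instance (n : Int) (out : List String) : Decidable (Spec_pyramidTriangle n out) := by unfold Spec_pyramidTriangle; infer_instance

-- ===== CLAIM (what is proved, stated in full; the proofs are below) =====
def Claim_equal_pyramidTriangle : Prop := ∀ (n : Int), Dom_pyramidTriangle n → Spec_pyramidTriangle n (pyramidTriangle n)

-- ===== LEMMAS AND PROOFS =====

-- ascending string "1 2 … m"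
def pvAsc : Nat → String
  | 0 => ""
  | m + 1 => pvAsc m ++ PySem.Int.toStr ((m : Int) + 1)

-- descending string "m m-1 … 1"
def pvDesc : Nat → String
  | 0 => ""
  | m + 1 => PySem.Int.toStr ((m : Int) + 1) ++ pvDesc m

theorem pvAscA (m : Nat) (s : String) :
    (PySem.List.pyRange 1 ((m : Int) + 1) 1).foldl (fun r j => r ++ PySem.Int.toStr j) s
      = s ++ pvAsc m := by
  induction m generalizing s with
  | zero => simp [PySem.List.pyRange_one_eq_nil, pvAsc]
  | succ k ih =>
    push_cast
    rw [PySem.List.pyRange_one_succ_right (by omega : (1:Int) ≤ (k:Int) + 1)]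
    simp [List.foldl_append, ih, pvAsc, String.append_assoc]

theorem pvDescA (m : Nat) (s : String) :
    (PySem.List.pyRange (m : Int) 0 (-1)).foldl (fun r j => r ++ PySem.Int.toStr j) s
      = s ++ pvDesc m := by
  induction m generalizing s with
  | zero => simp [PySem.List.pyRange_neg_one_eq_nil, pvDesc]
  | succ k ih =>
    push_cast
    rw [PySem.List.pyRange_neg_one_cons (by omega : (0:Int) < (k:Int) + 1)]
    simp only [List.foldl_cons]
    rw [show (k : Int) + 1 - 1 = (k : Int) by ring, ih]
    simp [pvDesc, String.append_assoc]

theorem pvInv (m : Nat) :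
    (PySem.List.pyRange 0 (m : Int) 1).foldl (fun (st : String × String × List String) i =>
        let asc := st.1 ++ PySem.Int.toStr (i + 1)
        let desc := if 1 ≤ i then PySem.Int.toStr i ++ st.2.1 else st.2.1
        (asc, desc, st.2.2 ++ [asc ++ desc])) ("", "", [])
      = (pvAsc m, pvDesc (m - 1),
         (PySem.List.pyRange 0 (m : Int) 1).foldl (fun result i =>
            let row := ""
            let row := (PySem.List.pyRange 1 (i + 2) 1).foldl (fun row j => row ++ PySem.Int.toStr j) row
            let row := (PySem.List.pyRange i 0 (-1)).foldl (fun row j => row ++ PySem.Int.toStr j) row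
            result ++ [row]) []) := by
  induction m with
  | zero => simp [PySem.List.pyRange_one_eq_nil, pvAsc, pvDesc]
  | succ k ih =>
    push_cast
    rw [PySem.List.pyRange_one_succ_right (by omega : (0:Int) ≤ (k:Int))]
    simp only [List.foldl_append, List.foldl_cons, List.foldl_nil, ih]
    have hasc : pvAsc k ++ PySem.Int.toStr ((k : Int) + 1) = pvAsc (k + 1) := rfl
    have hrowA : (PySem.List.pyRange 1 ((k : Int) + 2) 1).foldl
        (fun r j => r ++ PySem.Int.toStr j) "" = pvAsc (k + 1) := by
      have := pvAscA (k + 1) ""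
      rw [show (((k + 1 : Nat) : Int) + 1) = (k : Int) + 2 by push_cast; ring] at this
      simpa using this
    cases k with
    | zero =>
      simp only [Nat.cast_zero] at *
      have hrowA' : (PySem.List.pyRange 1 2 1).foldl
          (fun r j => r ++ PySem.Int.toStr j) "" = pvAsc 1 := by simpa using hrowA
      norm_num [hrowA', PySem.List.pyRange_neg_one_eq_nil, pvDesc, pvAsc]
    | succ j =>
      have h1 : (1 : Int) ≤ ((j + 1 : Nat) : Int) := by push_cast; omega
      have hdesc : PySem.Int.toStr ((j + 1 : Nat) : Int) ++ pvDesc (j + 1 - 1) = pvDesc (j + 1) := by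
        show PySem.Int.toStr ((j + 1 : Nat) : Int) ++ pvDesc j = pvDesc (j + 1)
        rw [show ((j + 1 : Nat) : Int) = (j : Int) + 1 by push_cast; ring]; rfl
      have hrowD := pvDescA (j + 1) (pvAsc (j + 1 + 1))
      simp only [if_pos h1, hrowA, hdesc, hasc]
      rw [hrowD]

-- ===== VERDICT (by name: the statement is the Claim_ definition above) =====
theorem pyramidTriangle_spec : Claim_equal_pyramidTriangle := by
  intro n _
  unfold Spec_pyramidTriangle pyramidTriangle pyramidTriangle_alt
  by_cases h : n ≤ 0
  · simp [PySem.List.pyRange_one_eq_nil h]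
  · have hn : n = ((n.toNat : Nat) : Int) := by omega
    rw [hn, pvInv n.toNat]
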